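-- pv_equiv track=rewrite | github.com/BurgerAndreas/ReactBench | ReactBench/utils/taffi_functions.py | ring_path
-- ===== SOURCE A (Python) =====
-- def ring_path(adj_list, ring, path=None):
--
--     # Initialize the loop starting from the minimum index, with the traversal direction set by min bonded index.
--     if path is None:
--         path = [min(ring), min(adj_list[min(ring)].intersection(ring))]
--
--     # This for recursive construction is needed to handle branching possibilities. All branches are followed and only the one yielding the full cycle is returned
--     for i in [_ for _ in adj_list[path[-1]] if _ in ring and _ not in path]:
--         try:
--             path = ring_path(adj_list, ring, path=path + [i])
--             return path
--         except:
--             pass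
--
--     # Eventually the recursions will reach the end of a cycle (i.e., for i in []: for the above loop) and hit this.
--     # If the path is shorter than the full cycle then it is invalid (i.e., the wrong branch was followed somewhere)
--     if len(path) == len(ring):
--         return path
--     else:
--         raise Exception(
--             "wrong path, didn't recover ring"
--         )  # This never gets printed, it is just used to trigger the except at a higher level of recursion.
-- ===== SOURCE B (Python) =====
-- def ring_path(adj_list, ring, path=None):
--     # Iterative DFS with an explicit stack instead of recursion + exception backtracking.
--     if path is None:
--         path = [min(ring), min(set(adj_list[min(ring)]).intersection(ring))]
--     stack = [path]
--     while stack: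
--         p = stack.pop()
--         nbrs = adj_list.get(p[-1]) if p else None
--         if nbrs is None:
--             continue  # endpoint not a listed vertex: dead branch
--         if len(p) == len(ring):
--             return p
--         ext = [x for x in nbrs if x in ring and x not in p]
--         # push in reversed order so the first neighbour is explored first (same pre-order as A)
--         stack.extend(p + [x] for x in reversed(ext))
--     raise Exception("wrong path, didn't recover ring")
-- ===== Notes on version B (the rewrite author's own statement) =====
-- stated objective: alternative
-- what changed: Replaces A's recursive backtracking that uses bare try/except exception handling for control flow with an explicit stack-based iterative DFS (children pushed in reversed order to keep the same pre-order), so no exception machinery or deep recursion is needed.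
import Mathlib
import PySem

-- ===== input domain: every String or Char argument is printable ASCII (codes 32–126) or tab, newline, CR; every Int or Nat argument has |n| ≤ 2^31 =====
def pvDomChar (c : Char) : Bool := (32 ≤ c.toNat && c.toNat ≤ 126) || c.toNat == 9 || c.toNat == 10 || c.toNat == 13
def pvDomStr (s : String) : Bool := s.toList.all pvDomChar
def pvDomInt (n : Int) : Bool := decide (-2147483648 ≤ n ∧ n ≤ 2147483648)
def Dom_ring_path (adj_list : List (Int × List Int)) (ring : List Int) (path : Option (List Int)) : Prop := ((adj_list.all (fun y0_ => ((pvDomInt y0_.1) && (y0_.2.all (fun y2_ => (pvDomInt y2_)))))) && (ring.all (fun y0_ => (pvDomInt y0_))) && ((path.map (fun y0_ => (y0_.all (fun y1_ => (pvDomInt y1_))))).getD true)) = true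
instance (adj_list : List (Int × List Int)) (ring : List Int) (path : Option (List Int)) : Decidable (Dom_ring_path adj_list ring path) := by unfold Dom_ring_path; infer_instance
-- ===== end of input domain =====

-- B replaces A's recursive backtracking (with try/except control flow) by an explicit stack-based
-- iterative DFS in the same pre-order; same cost, different decomposition (objective: alternative).


-- ===== PORT A =====
-- first-match lookup in the association-list model of a Python dict (adj_list[k]; none = KeyError)
def pvLookup (adj_list : List (Int × List Int)) (k : Int) : Option (List Int) :=
  PySem.Dict.get? (PySem.Dict.mk adj_list) k

-- shared by both ports and Pre_: the initial path [min(ring), min(adj_list[min(ring)] ∩ ring)]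
-- (or the caller-supplied path); none = one of these steps raises in Python.
def pvStart (adj_list : List (Int × List Int)) (ring : List Int) (path : Option (List Int)) : Option (List Int) :=
  match path with
  | some p => some p
  | none =>
    match PySem.List.min? ring (fun x => x) with
    | none => none
    | some m =>
      match pvLookup adj_list m with
      | none => none
      | some ns =>
        match PySem.List.min? (ns.filter (fun x => ring.contains x)) (fun x => x) with
        | none => none
        | some m2 => some [m, m2]

-- number of ring vertices not yet on the path (termination measure of A's recursion)
def pvKRem (ring p : List Int) : Nat := (ring.filter (fun x => !p.contains x)).length

theorem pvKRem_lt (ring p : List Int) {i : Int} (h1 : ring.contains i = true)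
    (h2 : p.contains i = false) : pvKRem ring (p ++ [i]) < pvKRem ring p := by
  unfold pvKRem
  have he : ring.filter (fun x => !(p ++ [i]).contains x)
      = (ring.filter (fun x => !p.contains x)).filter (fun x => !(x == i)) := by
    rw [List.filter_filter]
    apply List.filter_congr
    intro x _
    cases hpi : (x == i) <;> cases hpx : p.contains x <;>
      simp_all
  rw [he]
  apply List.length_filter_lt_length_iff_exists.mpr
  refine ⟨i, ?_, by simp⟩
  rw [List.mem_filter]
  constructor
  · simpa using h1
  · simpa using h2

-- A's recursive body: loop over admissible neighbours, first successful recursive call wins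
-- (try/except = Option), else return the path iff it has full length (raise = none).
def pvGoA (adj_list : List (Int × List Int)) (ring : List Int) (p : List Int) : Option (List Int) :=
  match p.getLast? with
  | none => none
  | some last =>
    match pvLookup adj_list last with
    | none => none
    | some ns =>
      match ((ns.filter (fun x => ring.contains x && !p.contains x)).attach.findSome?
              (fun i => pvGoA adj_list ring (p ++ [i.1]))) with
      | some r => some r
      | none => if p.length = ring.length then some p else none
termination_by pvKRem ring p
decreasing_by
  rcases List.mem_filter.mp i.2 with ⟨-, hcond⟩
  simp only [Bool.and_eq_true, Bool.not_eq_true'] at hcond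
  exact pvKRem_lt ring p hcond.1 hcond.2

-- Python A raising (ValueError/KeyError/IndexError/Exception) is modelled as none → [] here;
-- those inputs are excluded by Pre_ring_path.
def ring_path (adj_list : List (Int × List Int)) (ring : List Int) (path : Option (List Int)) : List Int :=
  match pvStart adj_list ring path with
  | none => []
  | some s => (pvGoA adj_list ring s).getD []

-- ===== PORT B =====
-- fuel bound for the stack machine (a pure totality guard, proved sufficient below)
def pvLmax (adj_list : List (Int × List Int)) : Nat :=
  adj_list.foldr (fun kv m => max kv.2.length m) 0

def pvCost (adj_list : List (Int × List Int)) (ring p : List Int) : Nat :=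
  (pvLmax adj_list + 1) ^ (pvKRem ring p + 1)

-- B's while-loop: pop a path (stack top = list head; Python pushes the extensions reversed and
-- pops from the end, i.e. prepends them in order here); skip if the endpoint is not a listed
-- vertex, return a full-length path, else push its extensions.
def pvGoB (adj_list : List (Int × List Int)) (ring : List Int) (fuel : Nat) (st : List (List Int)) : Option (List Int) :=
  match fuel, st with
  | 0, _ => none
  | _ + 1, [] => none
  | f + 1, p :: st' =>
    match p.getLast? with
    | none => pvGoB adj_list ring f st'
    | some last =>
      match pvLookup adj_list last with
      | none => pvGoB adj_list ring f st'
      | some ns =>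
        if p.length = ring.length then some p
        else pvGoB adj_list ring f
          (((ns.filter (fun x => ring.contains x && !p.contains x)).map (fun x => p ++ [x])) ++ st')
termination_by fuel

def ring_path_alt (adj_list : List (Int × List Int)) (ring : List Int) (path : Option (List Int)) : List Int :=
  match pvStart adj_list ring path with
  | none => []
  | some s => (pvGoB adj_list ring (pvCost adj_list ring s) [s]).getD []

-- ===== PRECONDITION & SPEC =====
def pvOkChain (adj_list : List (Int × List Int)) : Int → List Int → Bool
  | last, [] => (pvLookup adj_list last).isSome
  | last, i :: rest =>
    match pvLookup adj_list last with
    | none => false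
    | some ns => ns.contains i && pvOkChain adj_list i rest

-- kernel-computable subset and permutation enumerations (used only by Pre_)
def pvSublists (l : List Int) : List (List Int) :=
  match l with
  | [] => [[]]
  | a :: t => pvSublists t ++ (pvSublists t).map (a :: ·)

def pvInsertions (a : Int) (l : List Int) : List (List Int) :=
  match l with
  | [] => [[a]]
  | b :: t => (a :: b :: t) :: (pvInsertions a t).map (b :: ·)

def pvPerms (l : List Int) : List (List Int) :=
  match l with
  | [] => [[]]
  | a :: t => (pvPerms t).flatMap (pvInsertions a)

def pvExts (ring s : List Int) : List (List Int) :=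
  (pvSublists (ring.filter (fun x => !s.contains x))).flatMap pvPerms

-- Pre_ = A returns normally: the start pair exists and EXACTLY ONE ordering of the remaining ring
-- vertices completes it to a full-length adjacency path. Uniqueness deliberately narrows Pre_:
-- when several completions exist, which one A returns depends on Python's set-iteration order,
-- a defensible-corner artefact the ordered-list model of a set cannot reproduce.
def Pre_ring_path (adj_list : List (Int × List Int)) (ring : List Int) (path : Option (List Int)) : Prop :=
  (match pvStart adj_list ring path with
   | none => false
   | some s =>
     match s.getLast? with
     | none => false
     | some last =>
       (pvExts ring s).countP
         (fun ext => (s.length + ext.length == ring.length) && pvOkChain adj_list last ext) == 1) = true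
instance (adj_list : List (Int × List Int)) (ring : List Int) (path : Option (List Int)) : Decidable (Pre_ring_path adj_list ring path) := by unfold Pre_ring_path; infer_instance

def pvWitness_ring_path : (List (Int × List Int)) × List Int × Option (List Int) :=
  ([(0, [1, 2]), (1, [0, 2]), (2, [0, 1])], [0, 1, 2], none)

def Spec_ring_path (adj_list : List (Int × List Int)) (ring : List Int) (path : Option (List Int)) (out : List Int) : Prop := out = ring_path_alt adj_list ring path
instance (adj_list : List (Int × List Int)) (ring : List Int) (path : Option (List Int)) (out : List Int) : Decidable (Spec_ring_path adj_list ring path out) := by unfold Spec_ring_path; infer_instance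

-- ===== CLAIM (what is proved, stated in full; the proofs are below) =====
def Claim_equal_ring_path : Prop := ∀ (adj_list : List (Int × List Int)) (ring : List Int) (path : Option (List Int)), Dom_ring_path adj_list ring path → Pre_ring_path adj_list ring path → Spec_ring_path adj_list ring path (ring_path adj_list ring path)

-- ===== LEMMAS AND PROOFS =====
theorem pvFindSome?_attach {α β : Type} (l : List α) (f : α → Option β) :
    l.attach.findSome? (fun i => f i.1) = l.findSome? f := by
  induction l with
  | nil => rfl
  | cons a t ih =>
    simp only [List.attach_cons, List.findSome?_cons, List.findSome?_map]
    cases f a <;> simp_all [Function.comp]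

theorem pvGet_len_le (adj_list : List (Int × List Int)) (a : Int) (ns : List Int)
    (h : pvLookup adj_list a = some ns) : ns.length ≤ pvLmax adj_list := by
  induction adj_list with
  | nil => simp [pvLookup, PySem.Dict.get?] at h
  | cons kv t ih =>
    obtain ⟨k, v⟩ := kv
    rw [pvLookup, PySem.Dict.get?_mk_cons] at h
    simp only [pvLmax, List.foldr_cons]
    by_cases hk : (k == a) = true
    · rw [if_pos hk] at h
      injection h with h; subst h
      exact le_max_left _ _
    · rw [if_neg hk] at h
      exact le_trans (ih h) (le_max_right _ _)

theorem pvGoA_long (adj_list : List (Int × List Int)) (ring : List Int) :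
    ∀ (n : Nat) (p : List Int), pvKRem ring p ≤ n → ring.length < p.length →
      pvGoA adj_list ring p = none := by
  intro n
  induction n with
  | zero =>
    intro p hk hl
    rw [pvGoA]
    cases hgl : p.getLast? with
    | none => simp
    | some last =>
      cases hns : pvLookup adj_list last with
      | none => simp [hns]
      | some ns =>
        have hfs : (ns.filter (fun x => ring.contains x && !p.contains x)).attach.findSome?
            (fun i => pvGoA adj_list ring (p ++ [i.1])) = none := by
          rw [List.findSome?_eq_none_iff]
          rintro ⟨j, hj⟩ -
          exfalso
          rcases List.mem_filter.mp hj with ⟨-, hcond⟩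
          simp only [Bool.and_eq_true, Bool.not_eq_true'] at hcond
          have := pvKRem_lt ring p hcond.1 hcond.2
          omega
        simp [hns, hfs]
        omega
  | succ n ih =>
    intro p hk hl
    rw [pvGoA]
    cases hgl : p.getLast? with
    | none => simp
    | some last =>
      cases hns : pvLookup adj_list last with
      | none => simp [hns]
      | some ns =>
        have hfs : (ns.filter (fun x => ring.contains x && !p.contains x)).attach.findSome?
            (fun i => pvGoA adj_list ring (p ++ [i.1])) = none := by
          rw [List.findSome?_eq_none_iff]
          rintro ⟨j, hj⟩ -
          rcases List.mem_filter.mp hj with ⟨-, hcond⟩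
          simp only [Bool.and_eq_true, Bool.not_eq_true'] at hcond
          have hklt := pvKRem_lt ring p hcond.1 hcond.2
          exact ih (p ++ [j]) (by omega) (by simp; omega)
        simp [hns, hfs]
        omega

theorem pvCost_pos (adj_list : List (Int × List Int)) (ring p : List Int) :
    1 ≤ pvCost adj_list ring p :=
  Nat.one_le_pow _ _ (by omega)

theorem pvGoB_spec (adj_list : List (Int × List Int)) (ring : List Int) :
    ∀ (f : Nat) (st : List (List Int)), (st.map (pvCost adj_list ring)).sum ≤ f →
      pvGoB adj_list ring f st = st.findSome? (pvGoA adj_list ring) := by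
  intro f
  induction f with
  | zero =>
    intro st h
    cases st with
    | nil => rw [pvGoB]; simp
    | cons p st' =>
      exfalso
      have := pvCost_pos adj_list ring p
      simp only [List.map_cons, List.sum_cons] at h
      omega
  | succ f ih =>
    intro st h
    cases st with
    | nil => rw [pvGoB]; simp
    | cons p st' =>
      simp only [List.map_cons, List.sum_cons] at h
      have hcpos := pvCost_pos adj_list ring p
      rw [pvGoB, List.findSome?_cons]
      cases hgl : p.getLast? with
      | none =>
        have hA : pvGoA adj_list ring p = none := by rw [pvGoA]; simp only [hgl]
        rw [hA, ih st' (by omega)]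
      | some last =>
        cases hns : pvLookup adj_list last with
        | none =>
          have hA : pvGoA adj_list ring p = none := by rw [pvGoA]; simp [hgl, hns]
          rw [hA, ih st' (by omega)]
          simp [hns]
        | some ns =>
          by_cases hlen : p.length = ring.length
          · have hfs : (ns.filter (fun x => ring.contains x && !p.contains x)).attach.findSome?
                (fun i => pvGoA adj_list ring (p ++ [i.1])) = none := by
              rw [List.findSome?_eq_none_iff]
              rintro ⟨j, hj⟩ -
              exact pvGoA_long adj_list ring (pvKRem ring (p ++ [j])) (p ++ [j]) le_rfl
                (by simp; omega)
            have hA : pvGoA adj_list ring p = some p := by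
              rw [pvGoA]
              simp [hgl, hns, hfs, hlen]
            rw [hA]
            simp [hns, hlen]
          · have hA : pvGoA adj_list ring p
                = (ns.filter (fun x => ring.contains x && !p.contains x)).findSome?
                    (fun x => pvGoA adj_list ring (p ++ [x])) := by
              rw [pvGoA]
              simp only [hgl, hns]
              rw [pvFindSome?_attach (ns.filter (fun x => ring.contains x && !p.contains x))
                    (fun x => pvGoA adj_list ring (p ++ [x]))]
              cases hres : (ns.filter (fun x => ring.contains x && !p.contains x)).findSome?
                  (fun x => pvGoA adj_list ring (p ++ [x])) with
              | some r => simp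
              | none => simp [hlen]
            have hlenf : (ns.filter (fun x => ring.contains x && !p.contains x)).length
                ≤ pvLmax adj_list :=
              le_trans (List.length_filter_le _ _) (pvGet_len_le adj_list last ns hns)
            have hchild : ∀ q ∈ (ns.filter (fun x => ring.contains x && !p.contains x)).map
                (fun x => p ++ [x]), pvCost adj_list ring q
                ≤ (pvLmax adj_list + 1) ^ (pvKRem ring p) := by
              intro q hq
              obtain ⟨x, hx, rfl⟩ := List.mem_map.mp hq
              rcases List.mem_filter.mp hx with ⟨-, hcond⟩
              simp only [Bool.and_eq_true, Bool.not_eq_true'] at hcond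
              have hklt := pvKRem_lt ring p hcond.1 hcond.2
              unfold pvCost
              exact Nat.pow_le_pow_right (by omega) (by omega)
            have hsum2 : (((ns.filter (fun x => ring.contains x && !p.contains x)).map
                (fun x => p ++ [x])).map (pvCost adj_list ring)).sum
                ≤ pvLmax adj_list * (pvLmax adj_list + 1) ^ (pvKRem ring p) := by
              refine le_trans (List.sum_le_card_nsmul _ ((pvLmax adj_list + 1) ^ (pvKRem ring p)) ?_) ?_
              · intro x hx
                obtain ⟨q, hq, rfl⟩ := List.mem_map.mp hx
                exact hchild q hq
              · rw [smul_eq_mul, List.length_map, List.length_map]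
                exact Nat.mul_le_mul_right _ hlenf
            have hcexp : pvCost adj_list ring p
                = pvLmax adj_list * (pvLmax adj_list + 1) ^ (pvKRem ring p)
                  + (pvLmax adj_list + 1) ^ (pvKRem ring p) := by
              unfold pvCost
              rw [pow_succ]
              ring
            have hX : 1 ≤ (pvLmax adj_list + 1) ^ (pvKRem ring p) :=
              Nat.one_le_pow _ _ (by omega)
            have hf' : (((ns.filter (fun x => ring.contains x && !p.contains x)).map
                (fun x => p ++ [x]) ++ st').map (pvCost adj_list ring)).sum ≤ f := by
              rw [List.map_append, List.sum_append]
              set X := (pvLmax adj_list + 1) ^ (pvKRem ring p) with hXdef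
              set LX := pvLmax adj_list * X with hLXdef
              omega
            simp only [hns]
            rw [if_neg hlen, ih _ hf', List.findSome?_append, List.findSome?_map, hA]
            have hcomp : ((pvGoA adj_list ring) ∘ fun x => p ++ [x])
                = fun x => pvGoA adj_list ring (p ++ [x]) := rfl
            rw [hcomp]
            cases hres : (ns.filter (fun x => ring.contains x && !p.contains x)).findSome?
                (fun x => pvGoA adj_list ring (p ++ [x])) with
            | some r => simp
            | none => simp

theorem pv_ports_eq (adj_list : List (Int × List Int)) (ring : List Int) (path : Option (List Int)) :
    ring_path adj_list ring path = ring_path_alt adj_list ring path := by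
  unfold ring_path ring_path_alt
  cases hs : pvStart adj_list ring path with
  | none => rfl
  | some s =>
    have hB : pvGoB adj_list ring (pvCost adj_list ring s) [s] = pvGoA adj_list ring s := by
      rw [pvGoB_spec adj_list ring _ [s] (by simp), List.findSome?_cons]
      cases hres : pvGoA adj_list ring s <;> simp
    simp [hB]

-- ===== VERDICT (by name: the statement is the Claim_ definition above) =====
theorem ring_path_spec : Claim_equal_ring_path := by
  intro adj_list ring path _ _
  unfold Spec_ring_path
  exact pv_ports_eq adj_list ring path
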